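-- pv_equiv track=rewrite | github.com/emadehsan/notes | src/meta/rotary_lock_2.py | getMinCodeEntryTime
-- ===== SOURCE A (Python) =====
-- from typing import List
--
-- def getMinCodeEntryTime(N: int, M: int, C: List[int]) -> int:
--   '''
--   time: O(M^2):
--       * there are M codes to be entered on either of the wheels
--       * for each of those codes, the states set will contain at max M+1 states, other than the initial location 1,
--         no other code will be appear on either of the wheels that is not in the codes list C.
--         duplicate states get removed. e.g. to go from
--           curr_states [(1,2), (1,4),(1,6)] to Code 3, you will have only these
--           next_states [(1,3), (2,3), (3,4), (3,6)]
--
--   space: O(M+1)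
--   '''
--
--   def distance(src, dest):
--     return min(abs(src-dest), N - abs(src-dest))
--
--   # starting states of both wheels and total cost so far
--   states = dict()
--   states[(1,1)] = 0
--
--   for i in range(M):
--     # we can use both locks to reach C[i]. let's remember all unique possible states
--     # cause we might have to make some sub-optimal decisions, to achieve optimal overall costs
--
--     next_state = dict()
--
--     for A, B in states:
--       cost = states[(A, B)]
--
--       cost_a = distance(A, C[i])
--
--       # write smaller wheel state first. order of wheels doesnt matter. we just need to avoid duplicate states in dict
--       state_a = (min(C[i], B), max(C[i], B))
--
--       if state_a not in next_state:
--         next_state[state_a] = cost_a + cost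
--       next_state[state_a] = min(next_state[state_a], cost_a + cost)  # keep the smaller cost that ends with current combination/state
--
--       cost_b = distance(B, C[i])
--
--       state_b = (min(C[i], A), max(C[i], A))
--
--       if state_b not in next_state:
--         next_state[state_b] = cost_b + cost
--       next_state[state_b] = min(next_state[state_b], cost_b + cost)
--
--     # update current state for next iteration
--     states = next_state
--
--   # for the final state, pick the lowest cost of all states
--   least_cost = float('inf')
--   for A, B in states:
--     least_cost = min(least_cost, states[(A, B)])
--
--   return least_cost
-- ===== SOURCE B (Python) =====
-- from typing import List
--
-- def getMinCodeEntryTime(N: int, M: int, C: List[int]) -> int: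
--   # Backward DP over the code index: dp maps the position q of the "free" wheel
--   # (the one that did not type the previous code) to the minimal remaining cost.
--   def distance(src, dest):
--     return min(abs(src - dest), N - abs(src - dest))
--
--   codes = [C[i] for i in range(M)]
--   m = len(codes)
--
--   # at level i the wheel that typed the previous code sits at prev(i)
--   def prev(i):
--     return codes[i - 1] if i > 0 else 1
--
--   # level m: nothing left to type, cost 0 for every conceivable free-wheel position
--   dp = {}
--   for q in [1] + codes:
--     dp[q] = 0
--
--   for i in range(m - 1, -1, -1):
--     p, c = prev(i), codes[i]
--     ndp = {}
--     for q in [1] + codes[:max(i - 1, 0)]: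
--       ndp[q] = min(distance(p, c) + dp[q], distance(q, c) + dp[p])
--     dp = ndp
--
--   return dp[1]
-- ===== Notes on version B (the rewrite author's own statement) =====
-- stated objective: alternative
-- what changed: A pushes a dict of unordered wheel-position pairs forward through the codes; B runs a backward DP over the code index keyed only by the free wheel's position, with the typing wheel's position determined by the previous code.
import Mathlib
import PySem

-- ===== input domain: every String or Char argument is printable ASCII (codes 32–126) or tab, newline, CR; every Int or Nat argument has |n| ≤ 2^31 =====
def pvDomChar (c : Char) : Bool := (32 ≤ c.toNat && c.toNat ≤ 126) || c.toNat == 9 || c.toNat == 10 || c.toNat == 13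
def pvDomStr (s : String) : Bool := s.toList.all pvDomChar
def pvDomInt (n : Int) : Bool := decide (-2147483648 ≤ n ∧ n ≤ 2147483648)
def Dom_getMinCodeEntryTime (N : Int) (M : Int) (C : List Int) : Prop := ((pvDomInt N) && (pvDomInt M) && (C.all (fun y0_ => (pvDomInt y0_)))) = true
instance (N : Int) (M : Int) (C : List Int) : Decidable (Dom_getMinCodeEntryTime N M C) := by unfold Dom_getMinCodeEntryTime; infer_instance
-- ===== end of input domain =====

-- B replaces A's forward dict of wheel-position pairs by a backward index DP on the free wheel
-- (objective: alternative decomposition, same O(M·states) cost).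

-- ===== PORT A =====
-- distance helper shared verbatim by both Pythons
def pvDist (N src dest : Int) : Int := min (|src - dest|) (N - |src - dest|)

-- one iteration of A's outer loop: rebuild next_state from every (A,B) state
def pvStepA (N : Int) (states : PySem.Dict (Int × Int) Int) (c : Int) :
    PySem.Dict (Int × Int) Int :=
  states.keys.foldl (fun next_state ab =>
    let cost := states.getD (ab.1, ab.2) 0
    let cost_a := pvDist N ab.1 c
    let state_a := (min c ab.2, max c ab.2)
    let d1 := if next_state.contains state_a then next_state
              else next_state.insert state_a (cost_a + cost)
    let d2 := d1.insert state_a (min (d1.getD state_a 0) (cost_a + cost))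
    let cost_b := pvDist N ab.2 c
    let state_b := (min c ab.1, max c ab.1)
    let d3 := if d2.contains state_b then d2
              else d2.insert state_b (cost_b + cost)
    d3.insert state_b (min (d3.getD state_b 0) (cost_b + cost)))
    PySem.Dict.empty

def getMinCodeEntryTime (N : Int) (M : Int) (C : List Int) : Int :=
  let states0 : PySem.Dict (Int × Int) Int := PySem.Dict.empty.insert (1, 1) 0
  let states := (PySem.List.pyRange 0 M 1).foldl
    (fun st i => pvStepA N st (PySem.List.pyGetD C i 0)) states0
  -- least_cost = float('inf'); acc none plays the role of inf (min(inf, v) = v)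
  let least := states.keys.foldl
    (fun acc ab => match acc with
      | none => some (states.getD ab 0)
      | some m => some (min m (states.getD ab 0))) (none : Option Int)
  -- states is never empty, so Python's float('inf') is never returned; none is unreachable
  match least with
  | some v => v
  | none => 0

-- ===== PORT B =====
-- wheel that typed the previous code before position i (codes[i-1], or 1 at the start)
def pvPrevB (codes : List Int) (i : Int) : Int :=
  if 0 < i then PySem.List.pyGetD codes (i - 1) 0 else 1

-- one backward step: dp at level i+1 (keyed by the free wheel q) -> dp at level i
-- Python's dp[q]/dp[p] lookups always hit an existing key; ported as getD (default irrelevant)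
def pvStepB (N : Int) (codes : List Int) (dp : PySem.Dict Int Int) (i : Int) :
    PySem.Dict Int Int :=
  let p := pvPrevB codes i
  let c := PySem.List.pyGetD codes i 0
  ((1 : Int) :: PySem.List.slice codes none (some (max (i - 1) 0))).foldl
    (fun ndp q => ndp.insert q
      (min (pvDist N p c + dp.getD q 0) (pvDist N q c + dp.getD p 0)))
    PySem.Dict.empty

def getMinCodeEntryTime_alt (N : Int) (M : Int) (C : List Int) : Int :=
  let codes := (PySem.List.pyRange 0 M 1).map (fun i => PySem.List.pyGetD C i 0)
  let m : Int := (codes.length : Int)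
  let dp0 := ((1 : Int) :: codes).foldl (fun d q => d.insert q (0 : Int)) PySem.Dict.empty
  let dpF := (PySem.List.pyRange (m - 1) (-1) (-1)).foldl (pvStepB N codes) dp0
  dpF.getD 1 0

-- ===== PRECONDITION & SPEC =====
-- Pre_ excludes exactly M > len(C), where Python A raises IndexError on C[i]
def Pre_getMinCodeEntryTime (N : Int) (M : Int) (C : List Int) : Prop :=
  M ≤ (C.length : Int)
instance (N : Int) (M : Int) (C : List Int) : Decidable (Pre_getMinCodeEntryTime N M C) := by
  unfold Pre_getMinCodeEntryTime; infer_instance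

def pvWitness_getMinCodeEntryTime : Int × Int × List Int := (7, 2, [3, 5, 9])

def Spec_getMinCodeEntryTime (N : Int) (M : Int) (C : List Int) (out : Int) : Prop := out = getMinCodeEntryTime_alt N M C
instance (N : Int) (M : Int) (C : List Int) (out : Int) : Decidable (Spec_getMinCodeEntryTime N M C out) := by unfold Spec_getMinCodeEntryTime; infer_instance

-- ===== CLAIM (what is proved, stated in full; the proofs are below) =====
def Claim_equal_getMinCodeEntryTime : Prop := ∀ (N : Int) (M : Int) (C : List Int), Dom_getMinCodeEntryTime N M C → Pre_getMinCodeEntryTime N M C → Spec_getMinCodeEntryTime N M C (getMinCodeEntryTime N M C)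

-- ===== LEMMAS AND PROOFS =====

-- the common specification both ports are reduced to: minimal remaining cost with wheels at a, b
def pvG (N : Int) : List Int → Int → Int → Int
  | [], _, _ => 0
  | c :: rest, a, b =>
      min (pvDist N a c + pvG N rest c b) (pvDist N b c + pvG N rest a c)

lemma pvG_symm (N : Int) (cs : List Int) : ∀ a b, pvG N cs a b = pvG N cs b a := by
  induction cs with
  | nil => intro a b; rfl
  | cons c rest ih =>
      intro a b
      simp only [pvG]
      rw [ih a c, ih b c, min_comm]

lemma pvG_minmax (N : Int) (cs : List Int) (c b : Int) :
    pvG N cs (min c b) (max c b) = pvG N cs c b := by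
  rcases le_total c b with h | h
  · rw [min_eq_left h, max_eq_right h]
  · rw [min_eq_right h, max_eq_left h, pvG_symm]

-- min over an Option Int accumulator (none = Python's float('inf'))
def pvOmin : Option Int → Option Int → Option Int
  | none, y => y
  | some x, none => some x
  | some x, some y => some (min x y)

lemma pvOmin_none_right (x : Option Int) : pvOmin x none = x := by
  cases x <;> rfl

lemma pvOmin_assoc (a b c : Option Int) :
    pvOmin (pvOmin a b) c = pvOmin a (pvOmin b c) := by
  cases a <;> cases b <;> cases c <;> simp [pvOmin, min_assoc]

lemma pvOmin_right_comm (a b c : Option Int) :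
    pvOmin (pvOmin a b) c = pvOmin (pvOmin a c) b := by
  cases a <;> cases b <;> cases c <;> simp [pvOmin, min_comm, min_left_comm]

def pvLmin : List Int → Option Int
  | [] => none
  | x :: t => pvOmin (some x) (pvLmin t)

lemma pvLmin_append (l1 l2 : List Int) :
    pvLmin (l1 ++ l2) = pvOmin (pvLmin l1) (pvLmin l2) := by
  induction l1 with
  | nil => rfl
  | cons x t ih => simp [pvLmin, ih, pvOmin_assoc]

-- replacing the (unique) occurrence of k's value f k by min (f k) y mins y into the list
lemma pvLmin_map_upd (l : List (Int × Int)) (k : Int × Int) (f : Int × Int → Int) (y : Int)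
    (hnd : l.Nodup) (hk : k ∈ l) :
    pvLmin (l.map (fun ab => if ab = k then min (f k) y else f ab))
      = pvOmin (pvLmin (l.map f)) (some y) := by
  induction l with
  | nil => cases hk
  | cons hd t ih =>
      rcases List.nodup_cons.mp hnd with ⟨hhd, hndt⟩
      by_cases h : hd = k
      · subst h
        have ht : t.map (fun ab => if ab = hd then min (f hd) y else f ab) = t.map f := by
          apply List.map_congr_left
          intro ab hab
          have : ab ≠ hd := fun e => hhd (e ▸ hab)
          simp [this]
        simp only [List.map_cons, if_pos, pvLmin, ht]
        rw [pvOmin_right_comm]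
        rfl
      · have hk' : k ∈ t := by
          rcases List.mem_cons.mp hk with h' | h'
          · exact absurd h'.symm h
          · exact h'
        simp only [List.map_cons, if_neg h, pvLmin, ih hndt hk', ← pvOmin_assoc]

-- the two Python statements 'if k not in d: d[k] = x; d[k] = min(d[k], x)'
def pvUpsert (d : PySem.Dict (Int × Int) Int) (k : Int × Int) (x : Int) :
    PySem.Dict (Int × Int) Int :=
  let d1 := if d.contains k then d else d.insert k x
  d1.insert k (min (d1.getD k 0) x)

lemma pvUpsert_nodup (d : PySem.Dict (Int × Int) Int) (k : Int × Int) (x : Int)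
    (hnd : d.keys.Nodup) : (pvUpsert d k x).keys.Nodup := by
  unfold pvUpsert
  split_ifs with hc
  · exact PySem.Dict.nodup_keys_insert _ _ _ hnd
  · exact PySem.Dict.nodup_keys_insert _ _ _ (PySem.Dict.nodup_keys_insert _ _ _ hnd)

lemma pvUpsert_best (d : PySem.Dict (Int × Int) Int) (k : Int × Int) (x : Int)
    (h : Int × Int → Int) (hnd : d.keys.Nodup) :
    pvLmin ((pvUpsert d k x).keys.map (fun ab => (pvUpsert d k x).getD ab 0 + h ab))
      = pvOmin (pvLmin (d.keys.map (fun ab => d.getD ab 0 + h ab))) (some (x + h k)) := by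
  unfold pvUpsert
  by_cases hc : d.contains k = true
  · simp only [hc, if_true]
    have hkeys := PySem.Dict.keys_insert_of_contains d (min (d.getD k 0) x) hc
    have hkmem : k ∈ d.keys := (PySem.Dict.contains_iff_mem_keys d k).mp hc
    rw [hkeys]
    have hmap : d.keys.map (fun ab => (d.insert k (min (d.getD k 0) x)).getD ab 0 + h ab)
        = d.keys.map (fun ab =>
            if ab = k then min (d.getD k 0 + h k) (x + h k) else d.getD ab 0 + h ab) := by
      apply List.map_congr_left
      intro ab _
      rw [PySem.Dict.getD_insert]
      by_cases he : ab = k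
      · subst he; simp [min_add_add_right]
      · simp [he]
    rw [hmap]
    exact pvLmin_map_upd d.keys k (fun ab => d.getD ab 0 + h ab) (x + h k) hnd hkmem
  · have hc' : d.contains k = false := by simpa using hc
    simp only [hc', Bool.false_eq_true, if_false]
    have hkn : k ∉ d.keys := fun hm =>
      (by simp [hc'] : ¬ d.contains k = true) ((PySem.Dict.contains_iff_mem_keys d k).mpr hm)
    have hget1 : (d.insert k x).getD k 0 = x := PySem.Dict.getD_insert_self d k x 0
    rw [hget1, min_self]
    have hc1 : (d.insert k x).contains k = true := by
      exact (PySem.Dict.contains_iff_mem_keys _ k).mpr (by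
        rw [PySem.Dict.keys_insert_of_not_contains d x hc']; simp)
    have hkeys2 := PySem.Dict.keys_insert_of_contains (d.insert k x) x hc1
    rw [hkeys2, PySem.Dict.keys_insert_of_not_contains d x hc']
    rw [List.map_append, pvLmin_append]
    have hmap : d.keys.map (fun ab => ((d.insert k x).insert k x).getD ab 0 + h ab)
        = d.keys.map (fun ab => d.getD ab 0 + h ab) := by
      apply List.map_congr_left
      intro ab hab
      have hne : ab ≠ k := fun e => hkn (e ▸ hab)
      rw [PySem.Dict.getD_insert, if_neg hne, PySem.Dict.getD_insert, if_neg hne]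
    rw [hmap]
    simp [pvLmin, PySem.Dict.getD_insert_self, pvOmin_none_right]

-- minimum cost recorded in a pair-state dict, looking ahead through the remaining codes
def pvBest (N : Int) (rest : List Int) (d : PySem.Dict (Int × Int) Int) : Option Int :=
  pvLmin (d.keys.map (fun ab => d.getD ab 0 + pvG N rest ab.1 ab.2))

lemma pvStepA_fold_best (N c : Int) (rest : List Int) (d : PySem.Dict (Int × Int) Int) :
    ∀ (L : List (Int × Int)) (nd : PySem.Dict (Int × Int) Int), nd.keys.Nodup →
      (L.foldl (fun nd ab =>
          pvUpsert (pvUpsert nd (min c ab.2, max c ab.2) (pvDist N ab.1 c + d.getD (ab.1, ab.2) 0))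
            (min c ab.1, max c ab.1) (pvDist N ab.2 c + d.getD (ab.1, ab.2) 0)) nd).keys.Nodup ∧
      pvBest N rest (L.foldl (fun nd ab =>
          pvUpsert (pvUpsert nd (min c ab.2, max c ab.2) (pvDist N ab.1 c + d.getD (ab.1, ab.2) 0))
            (min c ab.1, max c ab.1) (pvDist N ab.2 c + d.getD (ab.1, ab.2) 0)) nd)
        = pvOmin (pvBest N rest nd)
            (pvLmin (L.map (fun ab => d.getD (ab.1, ab.2) 0 + pvG N (c :: rest) ab.1 ab.2))) := by
  intro L
  induction L with
  | nil =>
      intro nd hnd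
      exact ⟨hnd, by simp [pvLmin, pvOmin_none_right]⟩
  | cons ab t ih =>
      intro nd hnd
      simp only [List.foldl_cons]
      set k1 : Int × Int := (min c ab.2, max c ab.2) with hk1
      set k2 : Int × Int := (min c ab.1, max c ab.1) with hk2
      set cost : Int := d.getD (ab.1, ab.2) 0 with hcost
      have hnd1 : (pvUpsert nd k1 (pvDist N ab.1 c + cost)).keys.Nodup :=
        pvUpsert_nodup _ _ _ hnd
      have hnd2 : (pvUpsert (pvUpsert nd k1 (pvDist N ab.1 c + cost)) k2
          (pvDist N ab.2 c + cost)).keys.Nodup := pvUpsert_nodup _ _ _ hnd1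
      obtain ⟨hndF, hbF⟩ := ih _ hnd2
      refine ⟨hndF, ?_⟩
      rw [hbF]
      have e1 := pvUpsert_best nd k1 (pvDist N ab.1 c + cost)
        (fun p => pvG N rest p.1 p.2) hnd
      have e2 := pvUpsert_best (pvUpsert nd k1 (pvDist N ab.1 c + cost)) k2
        (pvDist N ab.2 c + cost) (fun p => pvG N rest p.1 p.2) hnd1
      have hb2 : pvBest N rest (pvUpsert (pvUpsert nd k1 (pvDist N ab.1 c + cost)) k2
          (pvDist N ab.2 c + cost))
          = pvOmin (pvOmin (pvBest N rest nd)
              (some (pvDist N ab.1 c + cost + pvG N rest c ab.2)))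
              (some (pvDist N ab.2 c + cost + pvG N rest c ab.1)) := by
        unfold pvBest
        rw [e2, e1]
        simp only [hk1, hk2, pvG_minmax]
      rw [hb2, pvOmin_assoc, pvOmin_assoc]
      congr 1
      rw [← pvOmin_assoc]
      congr 1
      show pvOmin (some _) (some _) = some _
      simp only [pvOmin]
      congr 1
      simp only [pvG]
      rw [pvG_symm N rest c ab.1]
      omega

lemma pvStepA_best (N c : Int) (rest : List Int) (d : PySem.Dict (Int × Int) Int)
    (hnd : d.keys.Nodup) :
    (pvStepA N d c).keys.Nodup ∧ pvBest N rest (pvStepA N d c) = pvBest N (c :: rest) d := by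
  have h := pvStepA_fold_best N c rest d d.keys PySem.Dict.empty
    (by rw [PySem.Dict.keys_empty]; exact List.nodup_nil)
  have hstep : pvStepA N d c = d.keys.foldl (fun nd ab =>
      pvUpsert (pvUpsert nd (min c ab.2, max c ab.2) (pvDist N ab.1 c + d.getD (ab.1, ab.2) 0))
        (min c ab.1, max c ab.1) (pvDist N ab.2 c + d.getD (ab.1, ab.2) 0)) PySem.Dict.empty := rfl
  rw [hstep]
  refine ⟨h.1, ?_⟩
  rw [h.2]
  have hbe : pvBest N rest PySem.Dict.empty = none := by
    unfold pvBest
    rw [PySem.Dict.keys_empty]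
    rfl
  rw [hbe]
  show pvLmin _ = pvBest N (c :: rest) d
  unfold pvBest
  congr 1

lemma pvLoopA_best (N : Int) (cs : List Int) :
    ∀ d : PySem.Dict (Int × Int) Int, d.keys.Nodup →
      pvBest N [] (cs.foldl (fun st c => pvStepA N st c) d) = pvBest N cs d := by
  induction cs with
  | nil => intro d _; rfl
  | cons c rest ih =>
      intro d hnd
      simp only [List.foldl_cons]
      obtain ⟨hnd', hb⟩ := pvStepA_best N c rest d hnd
      rw [ih _ hnd', hb]

lemma pvFoldMin (f : Int × Int → Int) :
    ∀ (l : List (Int × Int)) (acc : Option Int),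
      l.foldl (fun acc ab => match acc with
        | none => some (f ab)
        | some m => some (min m (f ab))) acc = pvOmin acc (pvLmin (l.map f)) := by
  intro l
  induction l with
  | nil => intro acc; rw [List.foldl_nil, List.map_nil, pvLmin, pvOmin_none_right]
  | cons hd t ih =>
      intro acc
      rw [List.foldl_cons, ih]
      have hstep : (match acc with
          | none => some (f hd)
          | some m => some (min m (f hd))) = pvOmin acc (some (f hd)) := by
        cases acc <;> rfl
      rw [hstep, List.map_cons, pvLmin, ← pvOmin_assoc]

lemma pvA_eq_g (N M : Int) (C : List Int) :
    getMinCodeEntryTime N M C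
      = pvG N ((PySem.List.pyRange 0 M 1).map (fun i => PySem.List.pyGetD C i 0)) 1 1 := by
  unfold getMinCodeEntryTime
  dsimp only []
  set codes := (PySem.List.pyRange 0 M 1).map (fun i => PySem.List.pyGetD C i 0) with hcodes
  set states0 : PySem.Dict (Int × Int) Int := PySem.Dict.empty.insert (1, 1) 0 with hs0
  have hfold : (PySem.List.pyRange 0 M 1).foldl
      (fun st i => pvStepA N st (PySem.List.pyGetD C i 0)) states0
      = codes.foldl (fun st c => pvStepA N st c) states0 := by
    rw [hcodes, List.foldl_map]
  rw [hfold]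
  have hkeys0 : states0.keys = [((1 : Int), (1 : Int))] := by
    rw [hs0, PySem.Dict.keys_insert_of_not_contains _ _ (PySem.Dict.contains_empty _),
      PySem.Dict.keys_empty]
    rfl
  have hnd0 : states0.keys.Nodup := by rw [hkeys0]; simp
  have hloop := pvLoopA_best N codes states0 hnd0
  have hinit : pvBest N codes states0 = some (pvG N codes 1 1) := by
    unfold pvBest
    rw [hkeys0]
    simp [pvLmin, pvOmin, hs0, PySem.Dict.getD_insert_self]
  set final := codes.foldl (fun st c => pvStepA N st c) states0 with hf
  have hmap : final.keys.map (fun ab => final.getD ab 0)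
      = final.keys.map (fun ab => final.getD ab 0 + pvG N [] ab.1 ab.2) := by
    apply List.map_congr_left
    intro ab _
    show final.getD ab 0 = final.getD ab 0 + pvG N [] ab.1 ab.2
    simp [pvG]
  rw [pvFoldMin (fun ab => final.getD ab 0) final.keys none]
  show (match pvOmin none (pvLmin (final.keys.map fun ab => final.getD ab 0)) with
    | some v => v | none => 0) = pvG N codes 1 1
  have : pvOmin none (pvLmin (final.keys.map fun ab => final.getD ab 0))
      = some (pvG N codes 1 1) := by
    show pvLmin (final.keys.map fun ab => final.getD ab 0) = some (pvG N codes 1 1)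
    rw [hmap]
    have : pvLmin (final.keys.map fun ab => final.getD ab 0 + pvG N [] ab.1 ab.2)
        = pvBest N [] final := rfl
    rw [this, hloop, hinit]
  rw [this]

-- value recorded by a fold of inserts whose value depends only on the key
lemma pvGetD_foldl_insert_fun (v : Int → Int) :
    ∀ (L : List Int) (d0 : PySem.Dict Int Int) (q : Int),
      (L.foldl (fun d x => d.insert x (v x)) d0).getD q 0
        = if q ∈ L then v q else d0.getD q 0 := by
  intro L
  induction L with
  | nil => intro d0 q; simp
  | cons x t ih =>
      intro d0 q
      rw [List.foldl_cons, ih]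
      by_cases hqt : q ∈ t
      · simp [hqt]
      · rw [if_neg hqt, PySem.Dict.getD_insert]
        by_cases hqx : q = x
        · subst hqx; simp
        · simp [hqx, hqt]

lemma pvStepB_inv (N : Int) (codes : List Int) (k : Nat) (hk : k < codes.length)
    (dp : PySem.Dict Int Int)
    (hdp : ∀ q : Int, (q = 1 ∨ q ∈ codes.take k) →
      dp.getD q 0 = pvG N (codes.drop (k + 1)) (pvPrevB codes (↑(k + 1))) q) :
    ∀ q : Int, (q = 1 ∨ q ∈ codes.take (k - 1)) →
      (pvStepB N codes dp ↑k).getD q 0 = pvG N (codes.drop k) (pvPrevB codes ↑k) q := by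
  intro q hq
  have hc : PySem.List.pyGetD codes (↑k) 0 = codes[k] := by
    rw [PySem.List.pyGetD_eq_getElem codes 0 (by positivity) (by exact_mod_cast hk)]
    simp
  have hprev1 : pvPrevB codes (↑(k + 1)) = codes[k] := by
    unfold pvPrevB
    rw [if_pos (by positivity)]
    have : (↑(k + 1) : Int) - 1 = (↑k : Int) := by push_cast; ring
    rw [this, hc]
  unfold pvStepB
  have hslice : PySem.List.slice codes none (some (max ((↑k : Int) - 1) 0))
      = codes.take (k - 1) := by
    rw [PySem.List.slice_to codes (le_max_right _ _)]
    congr 1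
    omega
  rw [hslice, hc]
  rw [pvGetD_foldl_insert_fun]
  have hmem : q ∈ (1 : Int) :: codes.take (k - 1) := by
    rcases hq with h | h
    · exact h ▸ List.mem_cons_self
    · exact List.mem_cons_of_mem _ h
  rw [if_pos hmem]
  -- dp lookups via the level-(k+1) invariant
  have hsub : codes.take (k - 1) ⊆ codes.take k := by
    have : codes.take (k - 1) = (codes.take k).take (k - 1) := by
      rw [List.take_take, min_eq_left (by omega)]
    rw [this]
    exact List.take_subset _ _
  have hq' : q = 1 ∨ q ∈ codes.take k := by
    rcases hq with h | h
    · exact Or.inl h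
    · exact Or.inr (hsub h)
  have hdq : dp.getD q 0 = pvG N (codes.drop (k + 1)) codes[k] q := by
    rw [hdp q hq', hprev1]
  have hdpmem : pvPrevB codes ↑k = 1 ∨ pvPrevB codes ↑k ∈ codes.take k := by
    unfold pvPrevB
    rcases Nat.eq_zero_or_pos k with h0 | h0
    · subst h0; simp
    · rw [if_pos (by exact_mod_cast h0)]
      right
      have hkm : (↑k : Int) - 1 = (↑(k - 1) : Nat) := by omega
      have hlt : k - 1 < codes.length := by omega
      rw [hkm, PySem.List.pyGetD_eq_getElem codes 0 (by positivity) (by exact_mod_cast hlt)]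
      have hlt' : k - 1 < (codes.take k).length := by
        rw [List.length_take]; omega
      simp only [Int.toNat_natCast]
      have heq : (codes.take k)[k - 1]'hlt' = codes[k - 1] := List.getElem_take
      exact heq ▸ List.getElem_mem hlt'
  have hdpp : dp.getD (pvPrevB codes ↑k) 0
      = pvG N (codes.drop (k + 1)) codes[k] (pvPrevB codes ↑k) := by
    rw [hdp _ hdpmem, hprev1]
  rw [hdq, hdpp]
  have hdrop : codes.drop k = codes[k] :: codes.drop (k + 1) :=
    List.drop_eq_getElem_cons hk
  rw [hdrop]
  simp only [pvG]
  rw [pvG_symm N (codes.drop (k + 1)) codes[k] (pvPrevB codes ↑k)]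

lemma pvLoopB (N : Int) (codes : List Int) :
    ∀ (k : Nat), k ≤ codes.length → ∀ dp : PySem.Dict Int Int,
      (∀ q : Int, (q = 1 ∨ q ∈ codes.take (k - 1)) →
        dp.getD q 0 = pvG N (codes.drop k) (pvPrevB codes ↑k) q) →
      ((PySem.List.pyRange ((↑k : Int) - 1) (-1) (-1)).foldl (pvStepB N codes) dp).getD 1 0
        = pvG N codes 1 1 := by
  intro k
  induction k with
  | zero =>
      intro _ dp hdp
      rw [PySem.List.pyRange_neg_one_eq_nil (by norm_num)]
      rw [List.foldl_nil]
      have := hdp 1 (Or.inl rfl)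
      rw [this]
      simp [pvPrevB]
  | succ j ih =>
      intro hle dp hdp
      have hcast : (↑(j + 1) : Int) - 1 = (↑j : Int) := by push_cast; ring
      rw [hcast, PySem.List.pyRange_neg_one_cons (by omega), List.foldl_cons]
      have hj : j < codes.length := by omega
      have hstep := pvStepB_inv N codes j hj dp (by
        intro q hq
        have : codes.take j = codes.take ((j + 1) - 1) := by norm_num
        exact hdp q (by rwa [← this]))
      exact ih (by omega) _ hstep

lemma pvB_eq_g (N M : Int) (C : List Int) :
    getMinCodeEntryTime_alt N M C
      = pvG N ((PySem.List.pyRange 0 M 1).map (fun i => PySem.List.pyGetD C i 0)) 1 1 := by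
  unfold getMinCodeEntryTime_alt
  set codes := (PySem.List.pyRange 0 M 1).map (fun i => PySem.List.pyGetD C i 0) with hcodes
  apply pvLoopB N codes codes.length le_rfl
  intro q hq
  have hmem : q ∈ (1 : Int) :: codes := by
    rcases hq with h | h
    · exact h ▸ List.mem_cons_self
    · exact List.mem_cons_of_mem _ (List.take_subset _ _ h)
  rw [pvGetD_foldl_insert_fun (fun _ => 0) ((1 : Int) :: codes) PySem.Dict.empty q,
    if_pos hmem]
  rw [List.drop_length]
  rfl

-- ===== VERDICT (by name: the statement is the Claim_ definition above) =====
theorem getMinCodeEntryTime_spec : Claim_equal_getMinCodeEntryTime := by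
  intro N M C _ _
  unfold Spec_getMinCodeEntryTime
  rw [pvA_eq_g, pvB_eq_g]
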